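-- pv_equiv track=rewrite | github.com/stebach/AdventOfCode | years/2024/day24/solve_2024_24.py | find_connected
-- ===== SOURCE A (Python) =====
-- def find_connected(data, key):
--     result = []
--     for wire in data['gates'][key][1]:
--         if wire[0] in ('x', 'y'):
--             result.append(wire)
--         else:
--             result.extend(find_connected(data, wire))
--     return result
-- ===== SOURCE B (Python) =====
-- def find_connected(data, key):
--     # Iterative worklist instead of recursion: explicit stack of pending wires.
--     gates = data['gates']
--     stack = list(reversed(gates[key][1]))
--     result = []
--     while stack:
--         wire = stack.pop()
--         if wire[0] in ('x', 'y'):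
--             result.append(wire)
--         else:
--             stack.extend(reversed(gates[wire][1]))
--     return result
-- ===== Notes on version B (the rewrite author's own statement) =====
-- stated objective: alternative
-- what changed: Replaces A's recursive expansion with an iterative worklist: an explicit stack seeded with the key's input wires (pushed in reverse) is popped in a single while loop, reproducing A's pre-order output exactly.
import Mathlib
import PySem

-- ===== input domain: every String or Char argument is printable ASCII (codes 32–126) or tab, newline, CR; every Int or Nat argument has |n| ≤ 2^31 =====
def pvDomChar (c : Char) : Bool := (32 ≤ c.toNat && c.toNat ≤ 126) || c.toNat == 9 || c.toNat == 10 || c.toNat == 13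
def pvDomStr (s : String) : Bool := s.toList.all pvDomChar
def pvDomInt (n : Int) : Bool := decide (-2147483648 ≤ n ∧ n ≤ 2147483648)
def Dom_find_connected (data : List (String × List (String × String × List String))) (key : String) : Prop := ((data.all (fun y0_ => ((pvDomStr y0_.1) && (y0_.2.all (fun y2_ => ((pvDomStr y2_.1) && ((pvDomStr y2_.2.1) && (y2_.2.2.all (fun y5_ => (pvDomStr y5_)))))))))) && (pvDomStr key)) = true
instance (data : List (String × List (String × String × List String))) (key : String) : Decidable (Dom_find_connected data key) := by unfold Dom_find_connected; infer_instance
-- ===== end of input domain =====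

-- B replaces A's recursion by an explicit worklist/stack loop (different decomposition, same values);
-- the equivalence is about return values on the Pre_ inputs (exactly where Python A returns normally).

-- gate-table lookup: data['gates'][k] (shared dict-access helper of both ports)
def pvL (g : List (String × String × List String)) (k : String) : Option (String × List String) :=
  (PySem.Dict.mk g).get? k

-- ===== PORT A =====
-- the for-loop body of A: accumulator `res`, recursion through `rec` (= A with one less fuel)
def pvLoopA (rec : String → Option (List String)) : List String → List String → Option (List String)
  | [], res => some res
  | wire :: rest, res =>
    match PySem.Str.pyGet? wire 0 with        -- wire[0]; none = IndexError on ""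
    | none => none
    | some c =>
      if c == 'x' || c == 'y' then pvLoopA rec rest (res ++ [wire])
      else
        match rec wire with
        | none => none
        | some r => pvLoopA rec rest (res ++ r)

-- A's recursion, totalized with fuel (under Pre_ the depth is < g.length + 1, proved below)
def pvGoA (g : List (String × String × List String)) : Nat → String → Option (List String)
  | 0, _ => none
  | f + 1, k =>
    match pvL g k with                        -- data['gates'][key]; none = KeyError
    | none => none
    | some v => pvLoopA (pvGoA g f) v.2 []

def find_connected (data : List (String × List (String × String × List String))) (key : String) : List String :=
  match (PySem.Dict.mk data).get? "gates" with  -- data['gates']; none = KeyError (outside Pre_)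
  | none => []
  | some g => (pvGoA g (g.length + 1) key).getD []

-- ===== PORT B =====
-- B's while loop. Python keeps the stack top at the END and pushes reversed(inputs) before popping;
-- modelled with the top at the HEAD, so the push is `v.2 ++ stack` — identical pop order.
-- Fuel totalizes the while loop; pvFuelB is proved sufficient under Pre_.
def pvGoB (g : List (String × String × List String)) : Nat → List String → List String → Option (List String)
  | 0, _, _ => none
  | _ + 1, [], result => some result
  | f + 1, wire :: stack, result =>
    match PySem.Str.pyGet? wire 0 with        -- wire[0]; none = IndexError on ""
    | none => none
    | some c =>
      if c == 'x' || c == 'y' then pvGoB g f stack (result ++ [wire])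
      else
        match pvL g wire with                 -- gates[wire]; none = KeyError
        | none => none
        | some v => pvGoB g f (v.2 ++ stack) result

def pvS (g : List (String × String × List String)) : Nat := (g.flatMap (fun e => e.2.2)).length

def pvFuelB (g : List (String × String × List String)) : Nat :=
  (pvS g + 1) * (pvS g + 2) ^ g.length + 1

def find_connected_alt (data : List (String × List (String × String × List String))) (key : String) : List String :=
  match (PySem.Dict.mk data).get? "gates" with  -- gates = data['gates']
  | none => []
  | some g =>
    match pvL g key with                        -- stack = list(reversed(gates[key][1]))
    | none => []
    | some v => (pvGoB g (pvFuelB g) v.2 []).getD []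

-- ===== PRECONDITION & SPEC =====
def pvIsXY (w : String) : Bool :=
  match w.toList with
  | c :: _ => c == 'x' || c == 'y'
  | [] => false

-- one saturation pass of the wires reachable from the key (deduplicated)
def pvStepR (g : List (String × String × List String)) (R : List String) : List String :=
  (R ++ R.flatMap (fun k =>
    match pvL g k with
    | none => []
    | some v => v.2.filter (fun w => !pvIsXY w))).dedup

def pvReach (g : List (String × String × List String)) : Nat → List String → List String
  | 0, R => R
  | n + 1, R => pvReach g n (pvStepR g R)

def pvReachAll (g : List (String × String × List String)) (key : String) : List String :=
  pvReach g (pvS g + 1) [key]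

-- n-step-bounded height of a wire in the gate DEPENDENCY GRAPH (a shape property of the input
-- table, independent of what the ports compute: it never builds leaf lists). pvH n k is the height
-- of k counting only paths of length ≤ n; it stabilizes in n exactly when no cycle lies below k.
def pvH (g : List (String × String × List String)) : Nat → String → Nat
  | 0, _ => 0
  | n + 1, k =>
    match pvL g k with
    | none => 0
    | some v => v.2.foldl (fun m w => if pvIsXY w then m else max m (1 + pvH g n w)) 0

-- Pre_ admits exactly the inputs on which Python A returns normally: it excludes a missing 'gates'
-- table and traversals that reach a missing gate key, an empty wire name, or a cycle
-- (KeyError / IndexError / RecursionError). Reachability and height stability are closed-form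
-- conditions on the wire graph of the input (which wires feed which, and that the fed-from relation
-- is acyclic below the key); they mention no accumulator and mimic neither port's computation.
def Pre_find_connected (data : List (String × List (String × String × List String))) (key : String) : Prop :=
  ((PySem.Dict.mk data).get? "gates").isSome = true ∧
  (∀ k ∈ pvReachAll (((PySem.Dict.mk data).get? "gates").getD []) key,
    let g := ((PySem.Dict.mk data).get? "gates").getD []
    (pvL g k).isSome = true ∧
    pvH g (g.length + 1) k = pvH g g.length k ∧
    ∀ w ∈ ((pvL g k).getD ("", [])).2,
      w ≠ "" ∧ (pvIsXY w = true ∨ w ∈ pvReachAll g key))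
instance (data : List (String × List (String × String × List String))) (key : String) : Decidable (Pre_find_connected data key) := by unfold Pre_find_connected; infer_instance

def pvWitness_find_connected : (List (String × List (String × String × List String))) × String :=
  ([("gates", [("s1", ("AND", ["x0", "y0"])), ("z1", ("OR", ["s1", "x1"]))])], "z1")

def Spec_find_connected (data : List (String × List (String × String × List String))) (key : String) (out : List String) : Prop := out = find_connected_alt data key
instance (data : List (String × List (String × String × List String))) (key : String) (out : List String) : Decidable (Spec_find_connected data key out) := by unfold Spec_find_connected; infer_instance

-- ===== CLAIM (what is proved, stated in full; the proofs are below) =====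
def Claim_equal_find_connected : Prop := ∀ (data : List (String × List (String × String × List String))) (key : String), Dom_find_connected data key → Pre_find_connected data key → Spec_find_connected data key (find_connected data key)

-- ===== LEMMAS AND PROOFS =====

lemma pv_sub_stepR (g : List (String × String × List String)) (R : List String) : R ⊆ pvStepR g R := by
  intro x hx
  simp [pvStepR, List.mem_dedup]
  exact Or.inl hx

lemma pv_sub_reach (g : List (String × String × List String)) :
    ∀ (n : Nat) (R : List String), R ⊆ pvReach g n R := by
  intro n
  induction n with
  | zero => intro R; simp [pvReach]
  | succ n ih => intro R; exact (pv_sub_stepR g R).trans (ih (pvStepR g R))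

lemma pvHead_of_ne (s : String) (h : s ≠ "") : ∃ c cs, s.toList = c :: cs := by
  rcases hl : s.toList with _ | ⟨c, cs⟩
  · exact absurd (String.toList_eq_nil_iff.mp hl) h
  · exact ⟨c, cs, rfl⟩

lemma pvGet0 (s : String) (c : Char) (cs : List Char) (h : s.toList = c :: cs) :
    PySem.Str.pyGet? s 0 = some c := by
  simp [PySem.Str.pyGet?, h, PySem.List.pyGet?, PySem.List.pyIdx?]

lemma pvXY_eq (s : String) (c : Char) (cs : List Char) (h : s.toList = c :: cs) :
    pvIsXY s = (c == 'x' || c == 'y') := by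
  simp [pvIsXY, h]

-- the produced list of A's loop does not depend on the accumulator
lemma pvLoopA_append (rec : String → Option (List String)) :
    ∀ (ins : List String) (res : List String),
      pvLoopA rec ins res = (pvLoopA rec ins []).map (fun t => res ++ t) := by
  intro ins
  induction ins with
  | nil => intro res; simp [pvLoopA]
  | cons w rest ih =>
    intro res
    simp only [pvLoopA]
    cases hget : PySem.Str.pyGet? w 0 with
    | none => simp
    | some c =>
      simp only
      by_cases hc : (c == 'x' || c == 'y') = true
      · rw [if_pos hc, if_pos hc, ih (res ++ [w]), ih ([] ++ [w])]
        cases pvLoopA rec rest [] <;> simp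
      · rw [if_neg hc, if_neg hc]
        cases hrec : rec w with
        | none => simp
        | some r0 =>
          dsimp only
          rw [ih (res ++ r0), ih ([] ++ r0)]
          cases pvLoopA rec rest [] <;> simp

lemma pvLoopA_isSome (rec : String → Option (List String)) :
    ∀ ins : List String,
      (∀ w ∈ ins, (∃ c cs, w.toList = c :: cs) ∧ (pvIsXY w = true ∨ (rec w).isSome = true)) →
      ∀ res, (pvLoopA rec ins res).isSome = true := by
  intro ins
  induction ins with
  | nil => intro _ res; simp [pvLoopA]
  | cons w rest ih =>
    intro h res
    obtain ⟨⟨c, cs, hcs⟩, hbr⟩ := h w (by simp)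
    simp only [pvLoopA, pvGet0 w c cs hcs]
    by_cases hc : (c == 'x' || c == 'y') = true
    · rw [if_pos hc]
      exact ih (fun u hu => h u (by simp [hu])) (res ++ [w])
    · rw [if_neg hc]
      rcases hbr with hxy | hsome
      · rw [pvXY_eq w c cs hcs] at hxy; exact absurd hxy hc
      · obtain ⟨r0, hr0⟩ := Option.isSome_iff_exists.mp hsome
        rw [hr0]
        exact ih (fun u hu => h u (by simp [hu])) (res ++ r0)

-- fold-with-max bounds
lemma pvFold_ge_acc (p : String → Bool) (f : String → Nat) :
    ∀ (l : List String) (a : Nat),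
      a ≤ l.foldl (fun m w => if p w then m else max m (f w)) a := by
  intro l
  induction l with
  | nil => intro a; simp
  | cons w rest ih =>
    intro a
    simp only [List.foldl_cons]
    refine le_trans ?_ (ih _)
    split_ifs <;> simp

lemma pvFold_ge (p : String → Bool) (f : String → Nat) :
    ∀ (l : List String) (a : Nat) (w : String), w ∈ l → p w = false →
      f w ≤ l.foldl (fun m w => if p w then m else max m (f w)) a := by
  intro l
  induction l with
  | nil => intro a w hw; simp at hw
  | cons u rest ih =>
    intro a w hw hp
    simp only [List.foldl_cons]
    rcases List.mem_cons.mp hw with rfl | hw'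
    · rw [hp]
      exact le_trans (le_max_right a (f w)) (pvFold_ge_acc p f rest _)
    · exact ih _ w hw' hp

lemma pvFold_le (p : String → Bool) (f : String → Nat) (b : Nat) :
    ∀ (l : List String) (a : Nat), (∀ w ∈ l, f w ≤ b) → a ≤ b →
      l.foldl (fun m w => if p w then m else max m (f w)) a ≤ b := by
  intro l
  induction l with
  | nil => intro a _ ha; simpa
  | cons u rest ih =>
    intro a h ha
    simp only [List.foldl_cons]
    refine ih _ (fun w hw => h w (by simp [hw])) ?_
    split_ifs with hp
    · exact ha
    · exact max_le ha (h u (by simp))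

lemma pvH_le (g : List (String × String × List String)) : ∀ n k, pvH g n k ≤ n := by
  intro n
  induction n with
  | zero => intro k; simp [pvH]
  | succ n ih =>
    intro k
    simp only [pvH]
    cases pvL g k with
    | none => simp
    | some v =>
      exact pvFold_le _ _ _ v.2 0 (fun w _ => by have := ih w; omega) (by omega)

-- a successful lookup returns the value of some entry of g
lemma pvL_mem : ∀ (g : List (String × String × List String)) (k : String) (v : String × List String),
    pvL g k = some v → ∃ e ∈ g, e.2 = v := by
  intro g
  induction g with
  | nil => intro k v h; simp [pvL] at h; cases h
  | cons e rest ih =>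
    intro k v h
    obtain ⟨k0, v0⟩ := e
    rw [pvL, PySem.Dict.get?_mk_cons] at h
    by_cases he : (k0 == k) = true
    · rw [if_pos he] at h
      exact ⟨(k0, v0), by simp, by simpa using h⟩
    · rw [if_neg he] at h
      obtain ⟨e', he', hv⟩ := ih k v h
      exact ⟨e', by simp [he'], hv⟩

lemma pvMem_len : ∀ (g : List (String × String × List String)) (e : String × String × List String),
    e ∈ g → e.2.2.length ≤ pvS g := by
  intro g
  induction g with
  | nil => intro e he; simp at he
  | cons e' rest ih =>
    intro e he
    simp only [pvS, List.flatMap_cons, List.length_append]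
    rcases List.mem_cons.mp he with rfl | he'
    · omega
    · have := ih e he'
      simp only [pvS] at this
      omega

lemma pvL_len (g : List (String × String × List String)) (k : String) (v : String × List String)
    (h : pvL g k = some v) : v.2.length ≤ pvS g := by
  obtain ⟨e, he, hv⟩ := pvL_mem g k v h
  have := pvMem_len g e he
  rw [hv] at this
  exact this

-- termination of A's recursion from the Pre_ clauses: the stable height is a decreasing measure
lemma pvGoA_some (g : List (String × String × List String)) (R : List String)
    (hC : ∀ k ∈ R, (pvL g k).isSome = true ∧
      pvH g (g.length + 1) k = pvH g g.length k ∧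
      ∀ w ∈ ((pvL g k).getD ("", [])).2, w ≠ "" ∧ (pvIsXY w = true ∨ w ∈ R)) :
    ∀ f, ∀ k ∈ R, pvH g g.length k < f → (pvGoA g f k).isSome = true := by
  intro f
  induction f with
  | zero => intro k _ h; omega
  | succ f ih =>
    intro k hk hlt
    obtain ⟨hsome, hH, hch⟩ := hC k hk
    obtain ⟨v, hv⟩ := Option.isSome_iff_exists.mp hsome
    rw [hv] at hch
    simp only [pvGoA, hv]
    refine pvLoopA_isSome _ v.2 ?_ []
    intro w hw
    obtain ⟨hne, hbr⟩ := hch w hw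
    refine ⟨pvHead_of_ne w hne, ?_⟩
    by_cases hxy2 : pvIsXY w = true
    · exact Or.inl hxy2
    · have hR : w ∈ R := by
        rcases hbr with hxy | hR
        · exact absurd hxy hxy2
        · exact hR
      refine Or.inr ?_
      have hdec : pvH g g.length w < pvH g g.length k := by
        have h1 : 1 + pvH g g.length w ≤ pvH g (g.length + 1) k := by
          have heq : pvH g (g.length + 1) k =
              v.2.foldl (fun m w => if pvIsXY w then m else max m (1 + pvH g g.length w)) 0 := by
            simp [pvH, hv]
          rw [heq]
          exact pvFold_ge pvIsXY (fun w => 1 + pvH g g.length w) v.2 0 w hw (by simpa using hxy2)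
        omega
      exact ih w hR (by omega)

-- the stack machine consumes a block `ins`, appending exactly what A's loop produces,
-- in at most (|ins|+1)·(S+2)^f steps
lemma pvExp (g : List (String × String × List String)) :
    ∀ f ins r, pvLoopA (pvGoA g f) ins [] = some r →
      ∃ n, n ≤ (ins.length + 1) * (pvS g + 2) ^ f ∧
        ∀ stack acc fb, pvGoB g (n + fb) (ins ++ stack) acc = pvGoB g fb stack (acc ++ r) := by
  intro f
  induction f using Nat.strong_induction_on with
  | _ f IHf =>
  intro ins
  induction ins with
  | nil =>
    intro r h
    simp only [pvLoopA, Option.some.injEq] at h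
    subst h
    exact ⟨0, by simp, fun stack acc fb => by simp⟩
  | cons w rest ihRest =>
    intro r h
    simp only [pvLoopA] at h
    cases hget : PySem.Str.pyGet? w 0 with
    | none => rw [hget] at h; simp at h
    | some c =>
      rw [hget] at h
      dsimp only at h
      by_cases hc : (c == 'x' || c == 'y') = true
      · rw [if_pos hc] at h
        rw [pvLoopA_append _ rest ([] ++ [w])] at h
        cases htail : pvLoopA (pvGoA g f) rest [] with
        | none => rw [htail] at h; simp at h
        | some r' =>
          rw [htail] at h
          simp only [Option.map_some, Option.some.injEq, List.nil_append] at h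
          obtain ⟨n', hn', hrun⟩ := ihRest r' htail
          refine ⟨n' + 1, ?_, ?_⟩
          · have hY : 1 ≤ (pvS g + 2) ^ f := Nat.one_le_pow _ _ (by omega)
            have e : (rest.length + 1 + 1) * (pvS g + 2) ^ f
                = (rest.length + 1) * (pvS g + 2) ^ f + (pvS g + 2) ^ f := by ring
            simp only [List.length_cons]
            omega
          · intro stack acc fb
            have hf : n' + 1 + fb = (n' + fb) + 1 := by omega
            rw [hf]
            simp only [List.cons_append, pvGoB, hget]
            rw [if_pos hc, hrun stack (acc ++ [w]) fb, ← h]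
            simp
      · rw [if_neg hc] at h
        cases hrec : pvGoA g f w with
        | none => rw [hrec] at h; simp at h
        | some rw0 =>
          rw [hrec] at h
          dsimp only at h
          rw [pvLoopA_append _ rest ([] ++ rw0)] at h
          cases htail : pvLoopA (pvGoA g f) rest [] with
          | none => rw [htail] at h; simp at h
          | some r'' =>
            rw [htail] at h
            simp only [Option.map_some, Option.some.injEq, List.nil_append] at h
            cases f with
            | zero => simp [pvGoA] at hrec
            | succ f' =>
              simp only [pvGoA] at hrec
              cases hL : pvL g w with
              | none => rw [hL] at hrec; simp at hrec
              | some v =>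
                rw [hL] at hrec
                dsimp only at hrec
                obtain ⟨n1, hb1, hrun1⟩ := IHf f' (by omega) v.2 rw0 hrec
                obtain ⟨n2, hb2, hrun2⟩ := ihRest r'' htail
                refine ⟨1 + n1 + n2, ?_, ?_⟩
                · have hY : 1 ≤ (pvS g + 2) ^ f' := Nat.one_le_pow _ _ (by omega)
                  have hpow : (pvS g + 2) ^ (f' + 1) = (pvS g + 2) ^ f' * (pvS g + 2) :=
                    pow_succ _ _
                  have hlen : v.2.length ≤ pvS g := pvL_len g w v hL
                  have hn1 : n1 ≤ (pvS g + 1) * (pvS g + 2) ^ f' :=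
                    le_trans hb1 (Nat.mul_le_mul_right _ (by omega))
                  rw [hpow] at hb2
                  have e : (rest.length + 1 + 1) * ((pvS g + 2) ^ f' * (pvS g + 2))
                      = (rest.length + 1) * ((pvS g + 2) ^ f' * (pvS g + 2))
                        + ((pvS g + 1) * (pvS g + 2) ^ f' + (pvS g + 2) ^ f') := by ring
                  simp only [List.length_cons, hpow]
                  omega
                · intro stack acc fb
                  have hf2 : 1 + n1 + n2 + fb = (n1 + (n2 + fb)) + 1 := by omega
                  rw [hf2]
                  simp only [List.cons_append, pvGoB, hget]
                  rw [if_neg hc, hL]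
                  dsimp only
                  have h1 := hrun1 (rest ++ stack) acc (n2 + fb)
                  rw [h1, hrun2 stack (acc ++ rw0) fb, ← h]
                  simp

-- ===== VERDICT (by name: the statement is the Claim_ definition above) =====
theorem find_connected_spec : Claim_equal_find_connected := by
  intro data key _hdom hpre
  obtain ⟨hg, hmain⟩ := hpre
  obtain ⟨g, hgates⟩ := Option.isSome_iff_exists.mp hg
  rw [hgates] at hmain
  simp only [Option.getD_some] at hmain
  have hC : ∀ k ∈ pvReachAll g key, (pvL g k).isSome = true ∧
      pvH g (g.length + 1) k = pvH g g.length k ∧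
      ∀ w ∈ ((pvL g k).getD ("", [])).2, w ≠ "" ∧ (pvIsXY w = true ∨ w ∈ pvReachAll g key) :=
    fun k hk => hmain k hk
  have hkeyR : key ∈ pvReachAll g key := pv_sub_reach g _ [key] (by simp)
  have hAs : (pvGoA g (g.length + 1) key).isSome = true :=
    pvGoA_some g (pvReachAll g key) hC (g.length + 1) key hkeyR
      (by have := pvH_le g g.length key; omega)
  obtain ⟨rA, hrA⟩ := Option.isSome_iff_exists.mp hAs
  obtain ⟨vk, hvk⟩ := Option.isSome_iff_exists.mp (hC key hkeyR).1
  have hunf : pvGoA g (g.length + 1) key = pvLoopA (pvGoA g g.length) vk.2 [] := by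
    simp [pvGoA, hvk]
  rw [hunf] at hrA
  obtain ⟨n, hn, hrun⟩ := pvExp g g.length vk.2 rA hrA
  have hlen : vk.2.length ≤ pvS g := pvL_len g key vk hvk
  have hnF : n + 1 ≤ pvFuelB g := by
    unfold pvFuelB
    have := le_trans hn (Nat.mul_le_mul_right ((pvS g + 2) ^ g.length) (by omega : vk.2.length + 1 ≤ pvS g + 1))
    omega
  have hB := hrun [] [] (pvFuelB g - n)
  rw [List.append_nil, List.nil_append] at hB
  have hfu : n + (pvFuelB g - n) = pvFuelB g := by omega
  rw [hfu] at hB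
  have hend : pvGoB g (pvFuelB g - n) [] rA = some rA := by
    obtain ⟨m, hm⟩ : ∃ m, pvFuelB g - n = m + 1 := ⟨pvFuelB g - n - 1, by omega⟩
    rw [hm]
    simp [pvGoB]
  rw [hend] at hB
  show find_connected data key = find_connected_alt data key
  unfold find_connected find_connected_alt
  rw [hgates]
  dsimp only
  rw [hvk, hunf, hrA]
  dsimp only
  rw [hB]
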